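-- pv_equiv track=rewrite | github.com/OscarLawrence/MomoAI | MomoAI/projects/core/validation/token_analyzer.py | _has_repetitive_patterns
-- ===== SOURCE A (Python) =====
-- def _has_repetitive_patterns(content: str) -> bool:
--     """Check for repetitive code patterns"""
--
--     lines = content.split('\n')
--     line_counts = {}
--
--     for line in lines:
--         stripped = line.strip()
--         if len(stripped) > 10:  # Only check substantial lines
--             line_counts[stripped] = line_counts.get(stripped, 0) + 1
--
--     # If any line appears more than 3 times, consider it repetitive
--     return any(count > 3 for count in line_counts.values())
-- ===== SOURCE B (Python) =====
-- def _has_repetitive_patterns(content: str) -> bool: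
--     """Check for repetitive code patterns"""
--     longs = sorted(s for s in (line.strip() for line in content.split('\n')) if len(s) > 10)
--     # in a sorted list, a value occurring more than 3 times means longs[i] == longs[i+3] for some i
--     return any(a == b for a, b in zip(longs, longs[3:]))
-- ===== Notes on version B (the rewrite author's own statement) =====
-- stated objective: alternative
-- what changed: Replaces A's dict-based frequency counting with a sort of the kept (stripped, length>10) lines followed by a single adjacent-comparison scan: a line occurs more than 3 times iff longs[i] == longs[i+3] for some i in the sorted list.
import Mathlib
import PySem

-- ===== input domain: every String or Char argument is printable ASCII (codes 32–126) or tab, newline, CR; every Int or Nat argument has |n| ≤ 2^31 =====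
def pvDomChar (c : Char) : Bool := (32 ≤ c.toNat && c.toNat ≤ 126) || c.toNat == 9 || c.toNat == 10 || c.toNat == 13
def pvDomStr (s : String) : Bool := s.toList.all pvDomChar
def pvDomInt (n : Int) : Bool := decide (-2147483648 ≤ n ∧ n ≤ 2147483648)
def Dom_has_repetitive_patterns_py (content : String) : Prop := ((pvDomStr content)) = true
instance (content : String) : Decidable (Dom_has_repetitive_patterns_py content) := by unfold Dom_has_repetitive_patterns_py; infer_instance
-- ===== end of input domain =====

-- B replaces A's dict-based frequency counting by sort-then-adjacent-comparison (longs[i] == longs[i+3] in the sorted list); objective: alternative algorithm, similar cost.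

-- ===== PORT A =====
def has_repetitive_patterns_py (content : String) : Bool :=
  let lines := (PySem.Str.split? content "\n").getD []
  let line_counts : PySem.Dict String Int :=
    lines.foldl (fun d line =>
      let stripped := PySem.Str.strip line
      if 10 < PySem.Str.len stripped then
        d.insert stripped (d.getD stripped 0 + 1)
      else d) PySem.Dict.empty
  line_counts.values.any (fun count => decide (3 < count))

-- ===== PORT B =====
def has_repetitive_patterns_py_alt (content : String) : Bool :=
  let longs := PySem.List.sorted
    ((((PySem.Str.split? content "\n").getD []).map PySem.Str.strip).filter
      (fun s => decide (10 < PySem.Str.len s))) (fun x => x) false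
  (longs.zip (PySem.List.slice longs (some 3) none)).any (fun p => p.1 == p.2)

-- ===== PRECONDITION & SPEC =====
def Spec_has_repetitive_patterns_py (content : String) (out : Bool) : Prop := out = has_repetitive_patterns_py_alt content
instance (content : String) (out : Bool) : Decidable (Spec_has_repetitive_patterns_py content out) := by unfold Spec_has_repetitive_patterns_py; infer_instance

-- ===== CLAIM (what is proved, stated in full; the proofs are below) =====
def Claim_equal_has_repetitive_patterns_py : Prop := ∀ (content : String), Dom_has_repetitive_patterns_py content → Spec_has_repetitive_patterns_py content (has_repetitive_patterns_py content)

-- ===== LEMMAS AND PROOFS =====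

theorem getElem_idx_congr {α : Type} (l : List α) {i j : Nat} (h : i = j) (hj : j < l.length) :
    l[i]'(h ▸ hj) = l[j]'hj := by subst h; rfl

-- A's loop (strip, filter by length, count in a dict) equals the counting loop over the filtered mapped list.
set_option maxHeartbeats 1000000 in
theorem foldA_eq_filtered (l : List String) (d : PySem.Dict String Int) :
    l.foldl (fun d line =>
      let stripped := PySem.Str.strip line
      if 10 < PySem.Str.len stripped then
        d.insert stripped (d.getD stripped 0 + 1)
      else d) d
    = ((l.map PySem.Str.strip).filter (fun s => decide (10 < PySem.Str.len s))).foldl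
        (fun d s => d.insert s (d.getD s 0 + 1)) d := by
  induction l generalizing d with
  | nil => rfl
  | cons h t ih =>
    simp only [List.foldl_cons, List.map_cons, List.filter_cons, decide_eq_true_eq]
    by_cases hc : 10 < PySem.Str.len (PySem.Str.strip h)
    · rw [if_pos hc, if_pos hc, List.foldl_cons]; exact ih _
    · rw [if_neg hc, if_neg hc]; exact ih d

-- A is true iff some kept line occurs more than 3 times.
theorem A_iff (xs : List String) :
    ((PySem.Dict.counter xs).values.any (fun count => decide ((3:Int) < count)) = true)
      ↔ ∃ x ∈ xs, 3 < xs.count x := by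
  simp only [PySem.Dict.values, PySem.Dict.items_counter, List.map_map, List.any_eq_true,
    List.mem_map, Function.comp]
  constructor
  · rintro ⟨c, ⟨k, hk, rfl⟩, hc⟩
    exact ⟨k, (PySem.Set.mem_ofList xs k).1 hk, by simpa using hc⟩
  · rintro ⟨x, hx, h3⟩
    refine ⟨(x, (xs.count x : Int)).2, ⟨x, (PySem.Set.mem_ofList xs x).2 hx, rfl⟩, ?_⟩
    simp only [decide_eq_true_eq]
    exact_mod_cast h3

-- in a ≤-sorted list bounded below by x, the occurrences of x form a prefix
theorem prefix_rep (ys : List String) (x : String)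
    (hp : ys.Pairwise (· ≤ ·)) (hb : ∀ y ∈ ys, x ≤ y) :
    ys.take (ys.count x) = List.replicate (ys.count x) x := by
  induction ys with
  | nil => simp
  | cons h t ih =>
    rcases List.pairwise_cons.1 hp with ⟨hh, hpt⟩
    by_cases hx : h = x
    · subst hx
      rw [List.count_cons_self]
      simpa [List.replicate_succ] using ih hpt hh
    · have hxh : x < h := lt_of_le_of_ne (hb h (by simp)) (fun e => hx e.symm)
      have hnot : x ∉ h :: t := by
        intro hmem
        rcases List.mem_cons.1 hmem with rfl | hmem'
        · exact absurd rfl (ne_of_gt hxh)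
        · exact absurd (hh x hmem') (not_le.2 hxh)
      rw [List.count_eq_zero.2 hnot]
      simp

theorem count_imp_idx (ys : List String) (hp : ys.Pairwise (· ≤ ·)) (x : String)
    (hc : 3 < ys.count x) :
    ∃ i, ∃ h : i + 3 < ys.length, ys[i]'(by omega) = ys[i+3]'h := by
  induction ys with
  | nil => simp at hc
  | cons h t ih =>
    rcases List.pairwise_cons.1 hp with ⟨hh, hpt⟩
    by_cases hx : h = x
    · subst hx
      have hb : ∀ y ∈ h :: t, h ≤ y := by
        intro y hy; rcases List.mem_cons.1 hy with rfl | hy'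
        · exact le_refl y
        · exact hh y hy'
      have htake := prefix_rep (h :: t) h hp hb
      have hlen : (h :: t).count h ≤ (h :: t).length := List.count_le_length
      have h3 : 3 < (h :: t).length := lt_of_lt_of_le hc hlen
      have hget : ∀ i, i < (h :: t).count h → ∀ (hi : i < (h :: t).length), (h :: t)[i]'hi = h := by
        intro i hic hi
        have h1 : (h :: t)[i]? = ((h :: t).take ((h :: t).count h))[i]? := by
          rw [List.getElem?_take, if_pos hic]
        rw [htake, List.getElem?_replicate, if_pos hic, List.getElem?_eq_getElem hi] at h1
        exact Option.some.inj h1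
      refine ⟨0, by omega, ?_⟩
      rw [hget 0 (by omega) (by omega), hget 3 (by omega) (by omega)]
    · have hcc : 3 < t.count x := by
        rwa [List.count_cons, if_neg (fun hbe => hx (beq_iff_eq.1 hbe)), Nat.add_zero] at hc
      rcases ih hpt hcc with ⟨i, hi, he⟩
      exact ⟨i + 1, by simpa using hi, by simpa using he⟩

theorem idx_imp_count (ys : List String) (hp : ys.Pairwise (· ≤ ·))
    (i : Nat) (h : i + 3 < ys.length) (he : ys[i]'(by omega) = ys[i+3]'h) :
    ∃ x, 3 < ys.count x := by
  set x := ys[i]'(by omega) with hxdef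
  have hmono := List.pairwise_iff_getElem.1 hp
  have heq : ∀ j (h1 : i ≤ j) (h2 : j ≤ i + 3) (hj : j < ys.length), ys[j]'hj = x := by
    intro j h1 h2 hj
    rcases eq_or_lt_of_le h1 with rfl | hlt
    · rfl
    rcases eq_or_lt_of_le h2 with rfl | hlt2
    · exact he.symm
    have hle1 : x ≤ ys[j]'hj := hmono i j (by omega) (by omega) hlt
    have hle2 : ys[j]'hj ≤ ys[i+3]'h := hmono j (i+3) (by omega) (by omega) hlt2
    exact le_antisymm (he ▸ hle2) hle1
  have hdrop : ys.drop i = x :: x :: x :: x :: ys.drop (i + 4) := by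
    rw [List.drop_eq_getElem_cons (by omega : i < ys.length),
        List.drop_eq_getElem_cons (by omega : i + 1 < ys.length),
        List.drop_eq_getElem_cons (by omega : i + 2 < ys.length),
        List.drop_eq_getElem_cons (by omega : i + 3 < ys.length)]
    rw [heq i (by omega) (by omega) (by omega), heq (i+1) (by omega) (by omega) (by omega),
        heq (i+2) (by omega) (by omega) (by omega), heq (i+3) (by omega) (by omega) (by omega)]
  refine ⟨x, ?_⟩
  have hcd : 3 < (ys.drop i).count x := by
    rw [hdrop]; simp
  have : (ys.take i).count x + (ys.drop i).count x = ys.count x := by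
    rw [← List.count_append, List.take_append_drop]
  omega

-- B's adjacent-comparison scan on a sorted list detects exactly a >3 multiplicity
theorem B_iff (ys : List String) (hp : ys.Pairwise (· ≤ ·)) :
    ((ys.zip (ys.drop 3)).any (fun p => p.1 == p.2) = true) ↔ ∃ x, 3 < ys.count x := by
  rw [List.any_eq_true]
  constructor
  · rintro ⟨p, hmem, hbeq⟩
    rcases List.mem_iff_getElem.1 hmem with ⟨i, hi, rfl⟩
    have hi' : i + 3 < ys.length := by
      simp only [List.length_zip, List.length_drop, lt_min_iff] at hi
      omega
    rw [List.getElem_zip] at hbeq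
    dsimp only at hbeq
    have h2 : (ys.drop 3)[i]'(by simp only [List.length_drop]; omega) = ys[3+i]'(by omega) :=
      List.getElem_drop
    rw [h2] at hbeq
    have heq : ys[i]'(by omega) = ys[i+3]'hi' := by
      rw [beq_iff_eq.1 hbeq]
      exact getElem_idx_congr ys (by omega) hi'
    exact idx_imp_count ys hp i hi' heq
  · rintro ⟨x, hc⟩
    rcases count_imp_idx ys hp x hc with ⟨i, hi, he⟩
    have hlen : i < (ys.zip (ys.drop 3)).length := by
      simp only [List.length_zip, List.length_drop]; omega
    refine ⟨(ys.zip (ys.drop 3))[i]'hlen, List.mem_iff_getElem.2 ⟨i, hlen, rfl⟩, ?_⟩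
    rw [List.getElem_zip]
    dsimp only
    have h2 : (ys.drop 3)[i]'(by simp only [List.length_drop]; omega) = ys[3+i]'(by omega) :=
      List.getElem_drop
    rw [h2]
    refine beq_iff_eq.2 ?_
    rw [he]
    exact getElem_idx_congr ys (by omega) (by omega)

-- ===== VERDICT (by name: the statement is the Claim_ definition above) =====
set_option maxHeartbeats 1000000 in
theorem has_repetitive_patterns_py_spec : Claim_equal_has_repetitive_patterns_py := by
  intro content _
  unfold Spec_has_repetitive_patterns_py
  set xs := ((((PySem.Str.split? content "\n").getD []).map PySem.Str.strip).filter
      (fun s => decide (10 < PySem.Str.len s))) with hxs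
  set ys := PySem.List.sorted xs (fun x => x) false with hys
  have e1 : has_repetitive_patterns_py content
      = ((((PySem.Str.split? content "\n").getD []).foldl (fun d line =>
          let stripped := PySem.Str.strip line
          if 10 < PySem.Str.len stripped then
            d.insert stripped (d.getD stripped 0 + 1)
          else d) (PySem.Dict.empty : PySem.Dict String Int)).values.any (fun count => decide (3 < count))) := by rfl
  have e2 : has_repetitive_patterns_py_alt content
      = (ys.zip (PySem.List.slice ys (some 3) none)).any (fun p => p.1 == p.2) := by rfl
  have hA : ((((PySem.Str.split? content "\n").getD []).foldl (fun d line =>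
          let stripped := PySem.Str.strip line
          if 10 < PySem.Str.len stripped then
            d.insert stripped (d.getD stripped 0 + 1)
          else d) (PySem.Dict.empty : PySem.Dict String Int))) = PySem.Dict.counter xs := by
    rw [foldA_eq_filtered, ← hxs, PySem.Dict.foldl_insert_getD_add_one_eq_counter]
  have hperm : ys.Perm xs := PySem.List.sorted_perm xs (fun x => x) false
  have hpair : ys.Pairwise (· ≤ ·) := by
    simpa using PySem.List.sorted_pairwise xs (fun x => x)
  have hslice : PySem.List.slice ys (some 3) none = ys.drop 3 := by
    simpa using PySem.List.slice_from ys (by norm_num : (0:Int) ≤ 3)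
  rw [e1, e2, hA, hslice]
  apply (Bool.eq_iff_iff.2 _)
  rw [A_iff, B_iff ys hpair]
  constructor
  · rintro ⟨x, _, hc⟩; exact ⟨x, by rwa [hperm.count_eq]⟩
  · rintro ⟨x, hc⟩
    have hxct : 3 < xs.count x := by rwa [hperm.count_eq] at hc
    exact ⟨x, List.count_pos_iff.1 (by omega), hxct⟩
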